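-- pv_equiv track=rewrite | github.com/miliar/Code_Jam_Webscraper | solutions_python/solutions_year10_round0_nr3/263.py | giveSum
-- ===== SOURCE A (Python) =====
-- def giveSum(R,k,n,a):
--     totalSum = 0
--     i = 0
--     numRides = 0
--     while True:
--         rideSum = 0
--         if(numRides!=0 and i==0 and ((R-numRides)>=numRides)):
--             totalSum = (R//numRides) * totalSum
--             numRides = (R//numRides) * numRides
--         numG = 0
--         if(R == numRides):
--             break
--         while(a[i]+rideSum<=k and numG<n):
--             rideSum += a[i]
--             i = (i+1)%n
--             numG+=1
--         numRides+=1
--         totalSum+=rideSum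
--     return totalSum
-- ===== SOURCE B (Python) =====
-- def giveSum(R, k, n, a):
--     # Cycle detection over start positions instead of A's "jump only at start 0" trick.
--     def ride(i):
--         s = 0
--         g = 0
--         while g < n and s + a[i] <= k:
--             s += a[i]
--             i = (i + 1) % n
--             g += 1
--         return s, i
--
--     total = 0
--     i = 0
--     r = 0
--     seen = {}
--     while r < R:
--         if i in seen:
--             r0, t0 = seen[i]
--             reps = (R - r) // (r - r0)
--             if reps > 0:
--                 total += reps * (total - t0)
--                 r += reps * (r - r0)
--                 continue
--         else:
--             seen[i] = (r, total)
--         s, i = ride(i)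
--         total += s
--         r += 1
--     return total
-- ===== Notes on version B (the rewrite author's own statement) =====
-- stated objective: alternative
-- what changed: A simulates ride after ride and only multiplies the running total when the queue pointer happens to return to start 0; B memoizes every ride-start position in a dict (start -> (rides done, running total)), detects the first repeated start anywhere on the trajectory, and jumps over all whole cycles at once.
-- outside the precondition, e.g. on giveSum(3, 0, 2, [5]): A returns 0, B returns 0
import Mathlib
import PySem

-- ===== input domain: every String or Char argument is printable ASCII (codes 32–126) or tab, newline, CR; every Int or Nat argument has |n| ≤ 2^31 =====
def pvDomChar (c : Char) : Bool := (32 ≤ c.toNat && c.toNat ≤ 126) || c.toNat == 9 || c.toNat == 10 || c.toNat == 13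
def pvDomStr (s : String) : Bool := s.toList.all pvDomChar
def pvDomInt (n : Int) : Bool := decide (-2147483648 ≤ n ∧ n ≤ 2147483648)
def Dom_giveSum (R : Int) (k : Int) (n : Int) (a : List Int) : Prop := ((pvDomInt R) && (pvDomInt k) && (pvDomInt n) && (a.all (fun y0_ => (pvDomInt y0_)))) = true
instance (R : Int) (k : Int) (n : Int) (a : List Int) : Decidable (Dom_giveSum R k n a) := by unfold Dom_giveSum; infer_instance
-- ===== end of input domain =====

-- B replaces A's "multiply the total when the queue pointer happens to return to start 0"
-- trick by cycle detection over ALL ride-start positions (a dict start ↦ (rides, total)).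

-- ===== PORT A =====
-- a[i] : inside Pre_ the index is always in range, so the default 0 is never the value used
def pyGetD (a : List Int) (i : Int) : Int := (PySem.List.pyGet? a i).getD 0

-- inner `while(a[i]+rideSum<=k and numG<n)`; fuel n.toNat+1 bounds its ≤ n.toNat+1 condition checks
def giveSumInner (k n : Int) (a : List Int) : Nat → Int → Int → Int → Int × Int
  | 0, rideSum, i, _ => (rideSum, i)
  | fuel+1, rideSum, i, numG =>
    if pyGetD a i + rideSum ≤ k ∧ numG < n then
      giveSumInner k n a fuel (rideSum + pyGetD a i) (PySem.Int.mod (i+1) n) (numG+1)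
    else (rideSum, i)

-- outer `while True`: numRides strictly increases each pass and stops at R, so R.toNat+1 fuel suffices on Pre_
def giveSumOuter (R k n : Int) (a : List Int) : Nat → Int → Int → Int → Int
  | 0, totalSum, _, _ => totalSum
  | fuel+1, totalSum, i, numRides =>
    let s : Int × Int :=
      if numRides ≠ 0 ∧ i = 0 ∧ R - numRides ≥ numRides then
        (PySem.Int.floordiv R numRides * totalSum, PySem.Int.floordiv R numRides * numRides)
      else (totalSum, numRides)
    if R = s.2 then s.1
    else
      let p := giveSumInner k n a (n.toNat+1) 0 i 0
      giveSumOuter R k n a fuel (s.1 + p.1) p.2 (s.2 + 1)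

def giveSum (R : Int) (k : Int) (n : Int) (a : List Int) : Int :=
  giveSumOuter R k n a (R.toNat+1) 0 0 0

-- ===== PORT B =====
-- Source B's ride(i): `while g < n and s + a[i] <= k`
def rideB (k n : Int) (a : List Int) : Nat → Int → Int → Int → Int × Int
  | 0, s, i, _ => (s, i)
  | fuel+1, s, i, g =>
    if g < n ∧ s + pyGetD a i ≤ k then
      rideB k n a fuel (s + pyGetD a i) (PySem.Int.mod (i+1) n) (g+1)
    else (s, i)

-- Source B's main loop; r strictly increases each pass, so R.toNat+1 fuel suffices on Pre_
def giveSumAltLoop (R k n : Int) (a : List Int) :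
    Nat → Int → Int → Int → PySem.Dict Int (Int × Int) → Int
  | 0, total, _, _, _ => total
  | fuel+1, total, i, r, seen =>
    if r < R then
      match seen.get? i with
      | some (r0, t0) =>
        let reps := PySem.Int.floordiv (R - r) (r - r0)
        if reps > 0 then
          giveSumAltLoop R k n a fuel (total + reps * (total - t0)) i (r + reps * (r - r0)) seen
        else
          let p := rideB k n a (n.toNat+1) 0 i 0
          giveSumAltLoop R k n a fuel (total + p.1) p.2 (r + 1) seen
      | none =>
        let p := rideB k n a (n.toNat+1) 0 i 0
        giveSumAltLoop R k n a fuel (total + p.1) p.2 (r + 1) (seen.insert i (r, total))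
    else total

def giveSum_alt (R : Int) (k : Int) (n : Int) (a : List Int) : Int :=
  giveSumAltLoop R k n a (R.toNat+1) 0 0 0 PySem.Dict.empty

-- ===== PRECONDITION & SPEC =====
-- Pre_ excludes R < 0 (A never terminates) and the index-unsafe shapes: n > len(a) (A's queue
-- pointer can run past the list and raise IndexError — whether it does depends on the data, and
-- where A happens to return B returns the same value) and n ≤ 0 with an empty a and R ≥ 1 (IndexError).
def Pre_giveSum (R : Int) (k : Int) (n : Int) (a : List Int) : Prop :=
  0 ≤ R ∧ ((1 ≤ n ∧ n ≤ (a.length : Int)) ∨ (n ≤ 0 ∧ (a ≠ [] ∨ R = 0)))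
instance (R : Int) (k : Int) (n : Int) (a : List Int) : Decidable (Pre_giveSum R k n a) := by
  unfold Pre_giveSum; infer_instance

def pvWitness_giveSum : Int × Int × Int × List Int := (5, 6, 3, [1, 2, 3])

-- (On n ≤ 0 with a = [] and R ≥ 1 — outside Pre_ — A raises IndexError evaluating a[0]; B returns 0 there.)

def Spec_giveSum (R : Int) (k : Int) (n : Int) (a : List Int) (out : Int) : Prop := out = giveSum_alt R k n a
instance (R : Int) (k : Int) (n : Int) (a : List Int) (out : Int) : Decidable (Spec_giveSum R k n a out) := by unfold Spec_giveSum; infer_instance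

-- ===== CLAIM (what is proved, stated in full; the proofs are below) =====
def Claim_equal_giveSum : Prop := ∀ (R : Int) (k : Int) (n : Int) (a : List Int), Dom_giveSum R k n a → Pre_giveSum R k n a → Spec_giveSum R k n a (giveSum R k n a)


-- ===== LEMMAS AND PROOFS =====

-- generic trajectory machinery over a step function f : start ↦ (ride sum, next start)
def Tgen (f : Int → Int × Int) : Nat → Int → Int
  | 0, _ => 0
  | r+1, i => (f i).1 + Tgen f r (f i).2

def endGen (f : Int → Int × Int) : Nat → Int → Int
  | 0, i => i
  | r+1, i => endGen f r (f i).2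

theorem endGen_add (f : Int → Int × Int) (x y : Nat) (i : Int) :
    endGen f (x + y) i = endGen f y (endGen f x i) := by
  induction x generalizing i with
  | zero => simp [endGen]
  | succ x ih =>
    have h : x + 1 + y = (x + y) + 1 := by omega
    rw [h]
    simp only [Tgen, endGen]
    rw [ih]

theorem Tgen_add (f : Int → Int × Int) (x y : Nat) (i : Int) :
    Tgen f (x + y) i = Tgen f x i + Tgen f y (endGen f x i) := by
  induction x generalizing i with
  | zero => simp [Tgen, endGen]
  | succ x ih =>
    have h : x + 1 + y = (x + y) + 1 := by omega
    rw [h]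
    simp only [Tgen, endGen]
    rw [ih]
    ring

theorem endGen_back (f : Int → Int × Int) (x : Nat) (i : Int) :
    endGen f (x + 1) i = (f (endGen f x i)).2 := by
  rw [endGen_add]; rfl

theorem Tgen_back (f : Int → Int × Int) (x : Nat) (i : Int) :
    Tgen f (x + 1) i = Tgen f x i + (f (endGen f x i)).1 := by
  rw [Tgen_add]; simp [Tgen]

theorem endGen_cycle (f : Int → Int × Int) (L : Nat) (i : Int) (h : endGen f L i = i) (c : Nat) :
    endGen f (c * L) i = i := by
  induction c with
  | zero => simp [endGen]
  | succ c ih => rw [Nat.succ_mul, endGen_add, ih, h]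

theorem Tgen_cycle (f : Int → Int × Int) (L : Nat) (i : Int) (h : endGen f L i = i) (c : Nat) :
    Tgen f (c * L) i = (c : Int) * Tgen f L i := by
  induction c with
  | zero => simp [Tgen]
  | succ c ih =>
    rw [Nat.succ_mul, Tgen_add, ih, endGen_cycle f L i h c]
    push_cast; ring

-- B's ride is the same computation as A's inner loop (the and-condition commuted)
theorem rideB_eq_inner (k n : Int) (a : List Int) (fuel : Nat) (s i g : Int) :
    rideB k n a fuel s i g = giveSumInner k n a fuel s i g := by
  induction fuel generalizing s i g with
  | zero => rfl
  | succ fuel ih =>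
    simp only [rideB, giveSumInner]
    by_cases h : pyGetD a i + s ≤ k ∧ g < n
    · rw [if_pos ⟨h.2, by linarith [h.1]⟩, if_pos h, ih]
    · rw [if_neg (fun hc => h ⟨by linarith [hc.2], hc.1⟩), if_neg h]

-- the one-ride step function both ports reduce to
def rideStep (k n : Int) (a : List Int) : Int → Int × Int :=
  fun i => giveSumInner k n a (n.toNat + 1) 0 i 0

-- A's outer loop computes Tgen (rideStep …) R.toNat 0
theorem outer_correct (R k n : Int) (a : List Int) :
    ∀ (fuel : Nat) (total i m : Int), 0 ≤ m → m ≤ R →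
    total = Tgen (rideStep k n a) m.toNat 0 → i = endGen (rideStep k n a) m.toNat 0 →
    (R - m).toNat < fuel →
    giveSumOuter R k n a fuel total i m = Tgen (rideStep k n a) R.toNat 0 := by
  intro fuel
  induction fuel with
  | zero => intro total i m _ _ _ _ hf; omega
  | succ fuel ih =>
    intro total i m hm0 hmR htot hi hf
    set f := rideStep k n a with hfdef
    simp only [giveSumOuter]
    by_cases hj : m ≠ 0 ∧ i = 0 ∧ R - m ≥ m
    · -- jump branch
      rw [if_pos hj]
      obtain ⟨hm, hi0, hR2⟩ := hj
      have hmpos : 0 < m := by omega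
      set q := PySem.Int.floordiv R m with hq
      have hqm_le : q * m ≤ R := by
        rw [hq, ← PySem.Int.le_floordiv_iff_mul_le hmpos]
      have hlt : R < (q + 1) * m := by
        rw [hq, ← PySem.Int.floordiv_lt_iff_lt_mul hmpos]; omega
      have hq2 : 2 ≤ q := by
        rw [hq, PySem.Int.le_floordiv_iff_mul_le hmpos]; omega
      have hbridge1 : 2 * m ≤ q * m := mul_le_mul_of_nonneg_right hq2 (by omega)
      have hbridge2 : (q + 1) * m = q * m + m := by ring
      have hcyc : endGen f m.toNat 0 = 0 := by rw [← hi, hi0]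
      have hqmnat : (q * m).toNat = q.toNat * m.toNat := by
        rw [Int.toNat_mul] <;> omega
      have htotqm : q * total = Tgen f (q * m).toNat 0 := by
        rw [hqmnat, Tgen_cycle f m.toNat 0 hcyc q.toNat, htot]
        congr 1; omega
      have hendqm : endGen f (q * m).toNat 0 = 0 := by
        rw [hqmnat]; exact endGen_cycle f m.toNat 0 hcyc q.toNat
      by_cases hstop : R = q * m
      · rw [if_pos (by exact hstop)]
        rw [htotqm, ← hstop]
      · rw [if_neg (by exact hstop)]
        apply ih
        · omega
        · omega
        · show q * total + (giveSumInner k n a (n.toNat+1) 0 i 0).1 = _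
          have h1 : (q * m + 1).toNat = (q * m).toNat + 1 := by omega
          rw [h1, Tgen_back, ← htotqm, hendqm, hi0]
          rfl
        · show (giveSumInner k n a (n.toNat+1) 0 i 0).2 = _
          have h1 : (q * m + 1).toNat = (q * m).toNat + 1 := by omega
          rw [h1, endGen_back, hendqm, hi0]
          rfl
        · omega
    · -- no jump
      rw [if_neg hj]
      by_cases hstop : R = m
      · rw [if_pos (by exact hstop)]
        rw [htot, hstop]
      · rw [if_neg (by exact hstop)]
        apply ih
        · omega
        · omega
        · show total + (giveSumInner k n a (n.toNat+1) 0 i 0).1 = _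
          have h1 : (m + 1).toNat = m.toNat + 1 := by omega
          rw [h1, Tgen_back, htot, hi]
          rfl
        · show (giveSumInner k n a (n.toNat+1) 0 i 0).2 = _
          have h1 : (m + 1).toNat = m.toNat + 1 := by omega
          rw [h1, endGen_back, hi]
          rfl
        · omega

-- B's loop computes the same trajectory sum
theorem alt_correct (R k n : Int) (a : List Int) :
    ∀ (fuel : Nat) (total i r : Int) (seen : PySem.Dict Int (Int × Int)), 0 ≤ r → r ≤ R →
    total = Tgen (rideStep k n a) r.toNat 0 → i = endGen (rideStep k n a) r.toNat 0 →
    (∀ j r0 t0, seen.get? j = some (r0, t0) →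
       0 ≤ r0 ∧ r0 < r ∧ j = endGen (rideStep k n a) r0.toNat 0 ∧ t0 = Tgen (rideStep k n a) r0.toNat 0) →
    (R - r).toNat < fuel →
    giveSumAltLoop R k n a fuel total i r seen = Tgen (rideStep k n a) R.toNat 0 := by
  intro fuel
  induction fuel with
  | zero => intro total i r seen _ _ _ _ _ hfu; omega
  | succ fuel ih =>
    intro total i r seen hr0 hrR htot hi hseen hfu
    set f := rideStep k n a with hfdef
    have hride1 : (rideB k n a (n.toNat+1) 0 i 0) = f i := by
      rw [rideB_eq_inner]; rfl
    have hstep_tot : total + (rideB k n a (n.toNat+1) 0 i 0).1 = Tgen f (r + 1).toNat 0 :=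
      by
      have h1 : (r + 1).toNat = r.toNat + 1 := by omega
      rw [h1, Tgen_back, hride1, htot, hi]
    have hstep_end : (rideB k n a (n.toNat+1) 0 i 0).2 = endGen f (r + 1).toNat 0 := by
      have h1 : (r + 1).toNat = r.toNat + 1 := by omega
      rw [h1, endGen_back, hride1, hi]
    simp only [giveSumAltLoop]
    by_cases hlt : r < R
    · rw [if_pos hlt]
      split
      · next r0 t0 hget =>
        obtain ⟨hr00, hr0r, hjend, ht0⟩ := hseen i r0 t0 hget
        have hLpos : (0:Int) < r - r0 := by omega
        split
        · next hpos =>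
          set reps := PySem.Int.floordiv (R - r) (r - r0) with hreps
          have hrepsle : reps * (r - r0) ≤ R - r := by
            rw [hreps, ← PySem.Int.le_floordiv_iff_mul_le hLpos]
          have hrnat : r.toNat = r0.toNat + (r - r0).toNat := by omega
          have hcyc : endGen f (r - r0).toNat i = i := by
            conv_rhs => rw [hi, hrnat, endGen_add, ← hjend]
          have hcycsum : total - t0 = Tgen f (r - r0).toNat i := by
            rw [htot, ht0, hrnat, Tgen_add, ← hjend]; ring
          have hrepsL : 1 ≤ reps * (r - r0) := by
            have h1 : (1:Int) * 1 ≤ reps * (r - r0) :=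
              mul_le_mul (by omega) (by omega) (by norm_num) (by omega)
            linarith
          have hrLnat : (reps * (r - r0)).toNat = reps.toNat * (r - r0).toNat := by
            rw [Int.toNat_mul] <;> omega
          apply ih
          · omega
          · omega
          · rw [hcycsum]
            have h2 : (r + reps * (r - r0)).toNat = r.toNat + (reps * (r - r0)).toNat := by omega
            rw [h2, Tgen_add, ← hi, hrLnat, Tgen_cycle f (r - r0).toNat i hcyc, ← htot]
            congr 2
            omega
          · have h2 : (r + reps * (r - r0)).toNat = r.toNat + (reps * (r - r0)).toNat := by omega
            rw [h2, endGen_add, ← hi, hrLnat, endGen_cycle f (r - r0).toNat i hcyc]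
          · intro j r0' t0' hg
            obtain ⟨h1, h2, h3, h4⟩ := hseen j r0' t0' hg
            exact ⟨h1, by omega, h3, h4⟩
          · omega
        · next hpos =>
          apply ih
          · omega
          · omega
          · exact hstep_tot
          · exact hstep_end
          · intro j r0' t0' hg
            obtain ⟨h1, h2, h3, h4⟩ := hseen j r0' t0' hg
            exact ⟨h1, by omega, h3, h4⟩
          · omega
      · next hget =>
        apply ih
        · omega
        · omega
        · exact hstep_tot
        · exact hstep_end
        · intro j r0' t0' hg
          rw [PySem.Dict.get?_insert] at hg
          by_cases hji : j = i
          · rw [if_pos hji] at hg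
            have hg' : (r, total) = (r0', t0') := by injection hg
            have h1 : r = r0' := congrArg Prod.fst hg'
            have h2 : total = t0' := congrArg Prod.snd hg'
            exact ⟨by omega, by omega, by rw [hji, ← h1]; exact hi, by rw [← h2, htot, h1]⟩
          · rw [if_neg hji] at hg
            obtain ⟨h1, h2, h3, h4⟩ := hseen j r0' t0' hg
            exact ⟨h1, by omega, h3, h4⟩
        · omega
    · rw [if_neg hlt]
      have hrR' : r = R := by omega
      rw [htot, hrR']

-- ===== VERDICT (by name: the statement is the Claim_ definition above) =====
theorem giveSum_spec : Claim_equal_giveSum := by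
  intro R k n a _ hpre
  unfold Spec_giveSum giveSum giveSum_alt
  have hR : 0 ≤ R := hpre.1
  rw [outer_correct R k n a (R.toNat+1) 0 0 0 le_rfl hR (by rfl) (by rfl) (by omega)]
  rw [alt_correct R k n a (R.toNat+1) 0 0 0 PySem.Dict.empty le_rfl hR (by rfl) (by rfl)
      (fun j r0 t0 hg => by simp [PySem.Dict.get?_empty] at hg) (by omega)]
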